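-- pv_equiv track=rewrite | github.com/SabinaBK/Software_Now_Assignment_2 | utils/stats.py | station_ranges
-- ===== SOURCE A (Python) =====
-- def station_ranges(data):
--     #Finds min, max and range for each station
--
--     ranges = {}  # Store range data
--
--     # Loop through each station
--     for station, temps in data.items():
--         ranges[station] = {
--             "max": max(temps),                 # Highest temp
--             "min": min(temps),                 # Lowest temp
--             "range": max(temps) - min(temps)   # Difference
--         }
--
--     return ranges  # Return all ranges
-- ===== SOURCE B (Python) =====
-- def station_ranges(data):
--     # One combined pass per station: running lo/hi instead of four min/max scans
--     ranges = {}
--     for station, temps in data.items():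
--         it = iter(temps)
--         lo = hi = next(it)
--         for t in it:
--             if t < lo:
--                 lo = t
--             if t > hi:
--                 hi = t
--         ranges[station] = {"max": hi, "min": lo, "range": hi - lo}
--     return ranges
-- ===== Notes on version B (the rewrite author's own statement) =====
-- stated objective: alternative
-- what changed: Replaces the four separate max()/min() scans per station with a single pass that maintains running lo/hi accumulators.
import Mathlib
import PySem

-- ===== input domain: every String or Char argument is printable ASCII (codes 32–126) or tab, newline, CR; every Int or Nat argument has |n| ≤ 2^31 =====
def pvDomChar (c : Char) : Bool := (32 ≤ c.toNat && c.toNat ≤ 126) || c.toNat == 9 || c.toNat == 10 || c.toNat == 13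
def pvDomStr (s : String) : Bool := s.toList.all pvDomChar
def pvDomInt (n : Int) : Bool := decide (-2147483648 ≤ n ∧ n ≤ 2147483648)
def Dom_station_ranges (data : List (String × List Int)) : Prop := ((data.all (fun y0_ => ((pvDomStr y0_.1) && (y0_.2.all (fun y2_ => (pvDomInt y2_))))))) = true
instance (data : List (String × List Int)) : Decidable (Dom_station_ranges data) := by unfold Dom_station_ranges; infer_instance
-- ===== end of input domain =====

-- B replaces A's four separate max()/min() scans per station by one combined lo/hi pass (alternative decomposition, same cost class).


-- ===== PORT A =====
-- ranges[station] = {"max": max(temps), "min": min(temps), "range": max(temps) - min(temps)}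
-- max()/min() raise ValueError on an empty list: that case is excluded by Pre_ (the .getD 0 is never reached there).
def station_ranges (data : List (String × List Int)) : List (String × List (String × Int)) :=
  (data.foldl
    (fun (ranges : PySem.Dict String (List (String × Int))) st =>
      ranges.insert st.1
        [("max", (PySem.List.max? st.2 (fun y => y)).getD 0),
         ("min", (PySem.List.min? st.2 (fun y => y)).getD 0),
         ("range", (PySem.List.max? st.2 (fun y => y)).getD 0 - (PySem.List.min? st.2 (fun y => y)).getD 0)])
    PySem.Dict.empty).items

-- ===== PORT B =====
-- single pass: lo = hi = next(it); then for each t update lo/hi.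
-- next(it) raises on an empty list (excluded by Pre_); the port leaves ranges unchanged there.
def station_ranges_alt (data : List (String × List Int)) : List (String × List (String × Int)) :=
  (data.foldl
    (fun (ranges : PySem.Dict String (List (String × Int))) st =>
      match st.2 with
      | [] => ranges
      | t :: ts =>
        let lh := ts.foldl
          (fun (lh : Int × Int) x =>
            (if x < lh.1 then x else lh.1, if x > lh.2 then x else lh.2)) (t, t)
        ranges.insert st.1 [("max", lh.2), ("min", lh.1), ("range", lh.2 - lh.1)])
    PySem.Dict.empty).items

-- ===== PRECONDITION & SPEC =====
-- Pre_ excludes inputs where some station's temperature list is empty: there Python A raises ValueError (max() of empty list).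
def Pre_station_ranges (data : List (String × List Int)) : Prop :=
  ∀ p ∈ data, p.2 ≠ []
instance (data : List (String × List Int)) : Decidable (Pre_station_ranges data) := by unfold Pre_station_ranges; infer_instance
def pvWitness_station_ranges : (List (String × List Int)) := [("a", [3, -1, 7]), ("b", [5])]
def Spec_station_ranges (data : List (String × List Int)) (out : List (String × List (String × Int))) : Prop := out = station_ranges_alt data
instance (data : List (String × List Int)) (out : List (String × List (String × Int))) : Decidable (Spec_station_ranges data out) := by unfold Spec_station_ranges; infer_instance

-- ===== CLAIM (what is proved, stated in full; the proofs are below) =====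
def Claim_equal_station_ranges : Prop := ∀ (data : List (String × List Int)), Dom_station_ranges data → Pre_station_ranges data → Spec_station_ranges data (station_ranges data)

-- ===== LEMMAS AND PROOFS =====

-- B's combined pair-fold is (running min, running max).
lemma lohi_fold (t : Int) (ts : List Int) :
    ts.foldl (fun (lh : Int × Int) x =>
        (if x < lh.1 then x else lh.1, if x > lh.2 then x else lh.2)) (t, t)
      = (ts.foldl min t, ts.foldl max t) := by
  rw [PySem.List.foldl_prod_mk (f := fun a x => if x < a then x else a)
        (g := fun a x => if x > a then x else a)]
  refine Prod.ext ?_ ?_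
  · exact PySem.List.foldl_congr_mem ts _ _ t
      (fun a x _ => by rw [min_def]; split_ifs <;> omega)
  · exact PySem.List.foldl_congr_mem ts _ _ t
      (fun a x _ => by rw [max_def]; split_ifs <;> omega)

-- ===== VERDICT (by name: the statement is the Claim_ definition above) =====
theorem station_ranges_spec : Claim_equal_station_ranges := by
  intro data _ hpre
  unfold Spec_station_ranges station_ranges station_ranges_alt
  congr 1
  apply PySem.List.foldl_congr_mem
  intro ranges p hp
  have hne := hpre p hp
  match h : p.2 with
  | [] => exact absurd h hne
  | t :: ts =>
    simp only [PySem.List.max?_id_cons, PySem.List.min?_id_cons, Option.getD_some, lohi_fold]
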